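-- pv_equiv track=rewrite | github.com/Emanuel1832/Programacion-IV | Ejercicios/Eje3.py | es_compuesto
-- ===== SOURCE A (Python) =====
-- def es_compuesto(numero):
--     divisores = 0
--     contador = 1
--     while contador <= numero:
--         if numero % contador == 0:
--             divisores += 1
--         contador += 1
--     return divisores > 2
-- ===== SOURCE B (Python) =====
-- def es_compuesto(numero):
--     if numero < 4:
--         return False
--     d = 2
--     while d * d <= numero:
--         if numero % d == 0:
--             return True
--         d += 1
--     return False
-- ===== Notes on version B (the rewrite author's own statement) =====
-- stated objective: faster
-- what changed: Replaces the full divisor-counting scan over 1..n with trial division up to sqrt(n) that returns True at the first proper divisor found.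
import Mathlib
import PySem

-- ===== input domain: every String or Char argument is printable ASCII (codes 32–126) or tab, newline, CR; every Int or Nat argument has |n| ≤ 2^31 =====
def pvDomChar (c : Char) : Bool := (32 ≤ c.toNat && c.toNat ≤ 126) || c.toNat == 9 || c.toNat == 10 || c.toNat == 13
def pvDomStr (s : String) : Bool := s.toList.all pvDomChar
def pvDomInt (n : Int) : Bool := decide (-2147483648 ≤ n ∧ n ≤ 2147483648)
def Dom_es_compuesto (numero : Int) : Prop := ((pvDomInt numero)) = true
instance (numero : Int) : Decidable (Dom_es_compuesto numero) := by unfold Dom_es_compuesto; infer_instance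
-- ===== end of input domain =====

-- B replaces A's full divisor count over 1..n by trial division up to sqrt(n) (objective: faster, asymptotic)

-- ===== PORT A =====
-- while contador <= numero: count divisors, then return divisores > 2
def esLoopA (numero contador divisores : Int) : Int :=
  if h : contador ≤ numero then
    esLoopA numero (contador + 1)
      (if PySem.Int.mod numero contador = 0 then divisores + 1 else divisores)
  else divisores
termination_by (numero + 1 - contador).toNat
decreasing_by omega

def es_compuesto (numero : Int) : Bool := decide (esLoopA numero 1 0 > 2)

-- ===== PORT B =====
-- while d * d <= numero: return True at the first divisor found
def esLoopB (numero d : Int) : Bool :=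
  if h : d * d ≤ numero then
    if PySem.Int.mod numero d = 0 then true else esLoopB numero (d + 1)
  else false
termination_by (numero + 1 - d).toNat
decreasing_by
  have hd : d ≤ d * d := by
    rcases Int.lt_or_le d 1 with h1 | h1
    · nlinarith [mul_self_nonneg d]
    · nlinarith
  omega

def es_compuesto_alt (numero : Int) : Bool :=
  if numero < 4 then false else esLoopB numero 2

-- ===== PRECONDITION & SPEC =====
def Spec_es_compuesto (numero : Int) (out : Bool) : Prop := out = es_compuesto_alt numero
instance (numero : Int) (out : Bool) : Decidable (Spec_es_compuesto numero out) := by unfold Spec_es_compuesto; infer_instance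

-- ===== CLAIM (what is proved, stated in full; the proofs are below) =====
def Claim_equal_es_compuesto : Prop := ∀ (numero : Int), Dom_es_compuesto numero → Spec_es_compuesto numero (es_compuesto numero)

-- ===== LEMMAS AND PROOFS =====

theorem loopA_eq (n c div : Int) (hc : 0 < c) :
    esLoopA n c div = div + (((Finset.Icc c n).filter (fun k => k ∣ n)).card : Int) := by
  revert hc
  induction c, div using esLoopA.induct n with
  | case1 c div h ih =>
    intro hc
    rw [esLoopA]
    simp only [h, dif_pos]
    simp only [dite_eq_ite] at ih
    rw [ih (by omega)]
    have hIcc : Finset.Icc c n = insert c (Finset.Icc (c + 1) n) := by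
      ext x; simp; omega
    have hnot : c ∉ Finset.Icc (c + 1) n := by simp
    rw [hIcc, Finset.filter_insert]
    simp only [PySem.Int.mod_eq_zero_iff_dvd]
    by_cases hdvd : c ∣ n
    · simp only [hdvd, if_pos]
      rw [Finset.card_insert_of_notMem (by simp)]
      push_cast; ring
    · simp [hdvd]
  | case2 c div h =>
    intro hc
    rw [esLoopA]
    simp only [h, dif_neg, not_false_iff]
    rw [Finset.Icc_eq_empty (by omega)]
    simp

theorem loopB_iff (n d : Int) (hd : 0 < d) :
    esLoopB n d = true ↔ ∃ k : Int, d ≤ k ∧ k * k ≤ n ∧ k ∣ n := by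
  revert hd
  induction d using esLoopB.induct n with
  | case1 d h hmod =>
    intro hd
    rw [esLoopB, dif_pos h, if_pos hmod]
    exact iff_of_true rfl ⟨d, le_refl d, h, (PySem.Int.mod_eq_zero_iff_dvd n d).mp hmod⟩
  | case2 d h hmod ih =>
    intro hd
    rw [esLoopB, dif_pos h, if_neg hmod, ih (by omega)]
    constructor
    · rintro ⟨k, hk1, hk2, hk3⟩
      exact ⟨k, by omega, hk2, hk3⟩
    · rintro ⟨k, hk1, hk2, hk3⟩
      refine ⟨k, ?_, hk2, hk3⟩
      rcases eq_or_lt_of_le hk1 with rfl | hlt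
      · exact absurd ((PySem.Int.mod_eq_zero_iff_dvd n d).mpr hk3) hmod
      · omega
  | case3 d h =>
    intro hd
    rw [esLoopB, dif_neg h]
    simp only [Bool.false_eq_true, false_iff]
    rintro ⟨k, hk1, hk2, _⟩
    have : d * d ≤ k * k := mul_le_mul hk1 hk1 (by omega) (by omega)
    omega

theorem math_iff (n : Int) (hn : 4 ≤ n) :
    (2 < ((Finset.Icc 1 n).filter (fun k => k ∣ n)).card) ↔ ∃ k : Int, 2 ≤ k ∧ k * k ≤ n ∧ k ∣ n := by
  constructor
  · intro hcard
    -- some divisor other than 1 and n exists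
    have hsub : ¬ ((Finset.Icc 1 n).filter (fun k => k ∣ n) ⊆ {1, n}) := by
      intro hs
      have := Finset.card_le_card hs
      have h2 : ({1, n} : Finset Int).card ≤ 2 := by
        apply le_trans (Finset.card_insert_le _ _); simp
      omega
    rcases Finset.not_subset.mp hsub with ⟨k, hkmem, hknot⟩
    simp only [Finset.mem_filter, Finset.mem_Icc] at hkmem
    simp only [Finset.mem_insert, Finset.mem_singleton] at hknot
    push Not at hknot
    obtain ⟨⟨hk1, hkn⟩, hkdvd⟩ := hkmem
    obtain ⟨hne1, hnen⟩ := hknot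
    -- k is a proper divisor: 2 ≤ k ≤ n - 1
    have hk2 : 2 ≤ k := by omega
    have hkn' : k ≤ n - 1 := by omega
    obtain ⟨q, hq⟩ := hkdvd
    have hq2 : 2 ≤ q := by nlinarith
    rcases Int.lt_or_le n (k * k) with hkk | hkk
    · -- n < k * k and n = k * q give q < k, hence q * q < k * q = n
      refine ⟨q, hq2, ?_, ⟨k, by rw [hq]; ring⟩⟩
      have hqk : q < k := by nlinarith
      nlinarith
    · exact ⟨k, hk2, hkk, ⟨q, hq⟩⟩
  · rintro ⟨k, hk2, hkk, hkdvd⟩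
    have hkn : k < n := by nlinarith
    have hsub : ({1, k, n} : Finset Int) ⊆ (Finset.Icc 1 n).filter (fun k => k ∣ n) := by
      intro x hx
      simp only [Finset.mem_insert, Finset.mem_singleton] at hx
      simp only [Finset.mem_filter, Finset.mem_Icc]
      rcases hx with rfl | rfl | rfl
      · exact ⟨⟨le_rfl, by omega⟩, one_dvd _⟩
      · exact ⟨⟨by omega, by omega⟩, hkdvd⟩
      · exact ⟨⟨by omega, le_rfl⟩, dvd_rfl⟩
    have hcard3 : ({1, k, n} : Finset Int).card = 3 := by
      rw [Finset.card_insert_of_notMem (by simp; omega),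
          Finset.card_insert_of_notMem (by simp; omega)]
      rfl
    have := Finset.card_le_card hsub
    omega

-- ===== VERDICT (by name: the statement is the Claim_ definition above) =====
theorem es_compuesto_spec : Claim_equal_es_compuesto := by
  intro numero _
  unfold Spec_es_compuesto es_compuesto es_compuesto_alt
  by_cases h4 : numero < 4
  · rw [if_pos h4]
    simp only [decide_eq_false_iff_not, not_lt, gt_iff_lt, not_lt]
    rw [loopA_eq numero 1 0 one_pos, zero_add]
    by_cases h3 : numero = 3
    · subst h3; decide
    · have hle : ((Finset.Icc 1 numero).filter (fun k => k ∣ numero)).card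
          ≤ (Finset.Icc 1 numero).card := Finset.card_filter_le _ _
      rw [Int.card_Icc] at hle
      omega
  · rw [if_neg h4]
    rw [loopA_eq numero 1 0 one_pos, zero_add]
    cases hb : esLoopB numero 2
    · simp only [gt_iff_lt, decide_eq_false_iff_not, not_lt]
      by_contra hlt
      have hlt' : 2 < ((Finset.Icc 1 numero).filter (fun k => k ∣ numero)).card := by
        omega
      have hex := (math_iff numero (by omega)).mp hlt'
      have := (loopB_iff numero 2 (by omega)).mpr hex
      rw [hb] at this
      exact Bool.false_ne_true this
    · simp only [gt_iff_lt, decide_eq_true_eq]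
      have := (math_iff numero (by omega)).mpr ((loopB_iff numero 2 (by omega)).mp hb)
      exact_mod_cast this
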